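-- pv_equiv track=rewrite | github.com/XingyanLiu/stagewiseNN | funx.py | shorter_name
-- ===== SOURCE A (Python) =====
-- def shorter_name(name:str, sep=(',', ' ')):
--     '''
--     test code
--     ----------
--     name = 'HNRNPUL2,HNRNPU,HNRNPUL1'
--     name = 'Cyclic nucleotide-gated channel cone photoreceptor subunit alpha'
--     shorter_name(name)
--
--
--     '''
--     if isinstance(sep, str):
--         parts = name.split(sep)
--         if len(parts) >= 3:
--             name = sep.join(parts[:2] + ['..'])
--     else:
--         for s in sep:
--             name = shorter_name(name, s)
--
--     return name
-- ===== SOURCE B (Python) =====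
-- def shorter_name(name: str, sep=(',', ' ')):
--     seps = (sep,) if isinstance(sep, str) else sep
--     for s in seps:
--         i = name.find(s)
--         if i < 0:
--             continue
--         j = name.find(s, i + len(s))
--         if j < 0:
--             continue
--         name = name[:j] + s + '..'
--     return name
-- ===== Notes on version B (the rewrite author's own statement) =====
-- stated objective: simpler
-- what changed: Instead of recursing on the separator tuple and doing split/join per separator, B normalizes sep to a flat loop and, per separator, locates the second non-overlapping occurrence with two str.find calls and truncates by slicing (name[:j] + s + '..'), never materializing the parts list.
import Mathlib
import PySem

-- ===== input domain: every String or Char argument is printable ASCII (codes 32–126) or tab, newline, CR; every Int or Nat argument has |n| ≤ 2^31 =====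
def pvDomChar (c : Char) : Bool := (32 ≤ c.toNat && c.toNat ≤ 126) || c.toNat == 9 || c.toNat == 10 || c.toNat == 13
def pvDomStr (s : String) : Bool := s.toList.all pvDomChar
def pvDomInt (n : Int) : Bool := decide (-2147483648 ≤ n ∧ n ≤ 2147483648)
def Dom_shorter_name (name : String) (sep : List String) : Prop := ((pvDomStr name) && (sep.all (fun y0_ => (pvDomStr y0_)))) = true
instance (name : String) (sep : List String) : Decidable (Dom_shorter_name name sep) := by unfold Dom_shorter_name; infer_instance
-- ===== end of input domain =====

-- B replaces A's recursion-plus-split/join with a flat loop that finds the second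
-- occurrence of each separator via two str.find calls and truncates by slicing (simpler).

-- ===== PORT A =====
-- one pass of A's string branch: parts = name.split(s); if len(parts) >= 3: name = s.join(parts[:2] + ['..'])
def shorterNameStepA (nm : String) (s : String) : String :=
  match PySem.Str.split? nm s with
  | none => nm          -- Python raises ValueError here (empty separator); excluded by Pre_
  | some parts =>
      if 3 ≤ parts.length then
        PySem.Str.join s (PySem.List.slice parts none (some 2) ++ [".."])
      else nm

-- A's tuple branch 'for s in sep: name = shorter_name(name, s)' where each recursive
-- call takes the string branch (sep : List String by the type convention)
def shorter_name (name : String) (sep : List String) : String :=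
  sep.foldl shorterNameStepA name

-- ===== PORT B =====
-- i = name.find(s); if i < 0: continue; j = name.find(s, i + len(s)); if j < 0: continue; name = name[:j] + s + '..'
def shorterNameStepB (nm : String) (s : String) : String :=
  let i := PySem.Str.find nm s
  if i < 0 then nm
  else
    let j := PySem.Str.findFrom nm s (i + PySem.Str.len s) none
    if j < 0 then nm
    else String.ofList ((PySem.Str.slice nm none (some j)).toList ++ s.toList ++ ['.', '.'])

def shorter_name_alt (name : String) (sep : List String) : String :=
  sep.foldl shorterNameStepB name

-- ===== PRECONDITION & SPEC =====
-- Pre_ excludes an empty-string separator, on which A's str.split raises ValueError.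
def Pre_shorter_name (name : String) (sep : List String) : Prop := ∀ s ∈ sep, s ≠ ""
instance (name : String) (sep : List String) : Decidable (Pre_shorter_name name sep) := by
  unfold Pre_shorter_name; infer_instance

def pvWitness_shorter_name : String × List String := ("HNRNPUL2,HNRNPU,HNRNPUL1", [",", " "])

def Spec_shorter_name (name : String) (sep : List String) (out : String) : Prop := out = shorter_name_alt name sep
instance (name : String) (sep : List String) (out : String) : Decidable (Spec_shorter_name name sep out) := by unfold Spec_shorter_name; infer_instance

-- ===== CLAIM (what is proved, stated in full; the proofs are below) =====
def Claim_equal_shorter_name : Prop := ∀ (name : String) (sep : List String), Dom_shorter_name name sep → Pre_shorter_name name sep → Spec_shorter_name name sep (shorter_name name sep)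

-- ===== LEMMAS AND PROOFS =====

-- clean structural version of Python's non-overlapping leftmost split (for sep ≠ [])
def mySplit (ss : List Char) : List Char → List (List Char)
  | [] => [[]]
  | c :: rest =>
      if h : ss.isPrefixOf (c :: rest) ∧ ss ≠ [] then
        [] :: mySplit ss ((c :: rest).drop ss.length)
      else
        (mySplit ss rest).modifyHead (c :: ·)
  termination_by cs => cs.length
  decreasing_by
    · have : 1 ≤ ss.length := by
        cases ss with
        | nil => exact absurd rfl h.2
        | cons a t => simp
      simp [List.length_drop]; omega
    · simp

theorem mySplit_ne_nil (ss cs : List Char) : mySplit ss cs ≠ [] := by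
  induction cs using mySplit.induct ss with
  | case1 => simp [mySplit]
  | case2 c rest h ih => simp [mySplit, h]
  | case3 c rest h ih =>
      simp only [mySplit, dif_neg h]
      cases hms : mySplit ss rest with
      | nil => exact absurd hms ih
      | cons p ps => simp

theorem splitOn_go_eq (ss : List Char) (hss : ss ≠ []) :
    ∀ (fuel : Nat) (l cur : List Char) (acc : List (List Char)), l.length < fuel →
      PySem.Chars.splitOn.go ss fuel l cur acc
        = acc.reverse ++ (mySplit ss l).modifyHead (cur.reverse ++ ·) := by
  intro fuel
  induction fuel with
  | zero => intro l cur acc h; exact absurd h (by omega)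
  | succ f ih =>
      intro l cur acc h
      cases l with
      | nil => simp [PySem.Chars.splitOn.go, mySplit]
      | cons c rest =>
          by_cases hp : ss.isPrefixOf (c :: rest)
          · have hm : 1 ≤ ss.length := by
              cases ss with
              | nil => exact absurd rfl hss
              | cons a t => simp
            rw [show PySem.Chars.splitOn.go ss (f + 1) (c :: rest) cur acc
                  = PySem.Chars.splitOn.go ss f ((c :: rest).drop ss.length) []
                      (cur.reverse :: acc) from by simp [PySem.Chars.splitOn.go, hp]]
            rw [ih _ _ _ (by simp at h ⊢; omega)]
            rw [show mySplit ss (c :: rest)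
                  = [] :: mySplit ss ((c :: rest).drop ss.length) from by
                rw [mySplit]; rw [dif_pos ⟨hp, hss⟩]]
            cases hms : mySplit ss ((c :: rest).drop ss.length) with
            | nil => exact absurd hms (mySplit_ne_nil ss _)
            | cons p ps => simp
          · rw [show PySem.Chars.splitOn.go ss (f + 1) (c :: rest) cur acc
                  = PySem.Chars.splitOn.go ss f rest (c :: cur) acc from by
                simp [PySem.Chars.splitOn.go, hp]]
            rw [ih _ _ _ (by simp at h ⊢; omega)]
            rw [show mySplit ss (c :: rest)
                  = (mySplit ss rest).modifyHead (c :: ·) from by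
                rw [mySplit]; rw [dif_neg (by simp [hp])]]
            cases hms : mySplit ss rest with
            | nil => exact absurd hms (mySplit_ne_nil ss _)
            | cons p ps => simp

theorem splitOn_eq_mySplit (cs ss : List Char) (hss : ss ≠ []) :
    PySem.Chars.splitOn cs ss = mySplit ss cs := by
  rw [show PySem.Chars.splitOn cs ss
        = PySem.Chars.splitOn.go ss (cs.length + 1) cs [] [] from rfl]
  rw [splitOn_go_eq ss hss _ _ _ _ (by omega)]
  cases hms : mySplit ss cs with
  | nil => exact absurd hms (mySplit_ne_nil ss _)
  | cons p ps => simp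

-- find = k characterizes mySplit's head
theorem find_eq_of (cs ss : List Char) (k : Nat)
    (h1 : ss.IsPrefix (cs.drop k)) (h2 : ∀ i < k, ¬ ss.IsPrefix (cs.drop i)) :
    PySem.Chars.find cs ss = (k : Int) := by
  have hinf : ss.IsInfix cs := h1.isInfix.trans (List.drop_suffix k cs).isInfix
  have h0 : 0 ≤ PySem.Chars.find cs ss := (PySem.Chars.find_nonneg_iff cs ss).2 hinf
  obtain ⟨hsp, hmin⟩ := PySem.Chars.find_spec h0
  have hne1 : ¬ (PySem.Chars.find cs ss).toNat < k := fun hlt => h2 _ hlt hsp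
  have hne2 : ¬ k < (PySem.Chars.find cs ss).toNat := fun hlt => hmin _ hlt h1
  omega

theorem mySplit_no_occ (cs ss : List Char) (_hss : ss ≠ [])
    (h : ¬ ss.IsInfix cs) : mySplit ss cs = [cs] := by
  induction cs with
  | nil => simp [mySplit]
  | cons c rest ih =>
      have hp : ¬ ss.isPrefixOf (c :: rest) := fun hp =>
        h ((List.isPrefixOf_iff_prefix.1 hp).isInfix)
      rw [mySplit, dif_neg (by simp [hp])]
      rw [ih (fun hin => h (hin.trans (List.suffix_cons c rest).isInfix))]
      rfl

theorem mySplit_of_find (cs ss : List Char) (hss : ss ≠ []) (k : Nat)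
    (h : PySem.Chars.find cs ss = (k : Int)) :
    mySplit ss cs = cs.take k :: mySplit ss (cs.drop (k + ss.length)) := by
  induction cs generalizing k with
  | nil =>
      obtain ⟨hsp, -⟩ := PySem.Chars.find_spec (s := []) (sub := ss) (by rw [h]; exact Int.natCast_nonneg k)
      simp only [List.drop_nil] at hsp
      exact absurd (List.prefix_nil.1 hsp) hss
  | cons c rest ih =>
      obtain ⟨hsp, hmin⟩ := PySem.Chars.find_spec (s := c :: rest) (sub := ss)
        (by rw [h]; exact Int.natCast_nonneg k)
      rw [h] at hsp hmin
      simp only [Int.toNat_natCast] at hsp hmin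
      by_cases hp : ss.isPrefixOf (c :: rest)
      · have hk0 : k = 0 := by
          by_contra hk
          exact hmin 0 (by omega) (by simpa using List.isPrefixOf_iff_prefix.1 hp)
        subst hk0
        rw [mySplit, dif_pos ⟨hp, hss⟩]
        simp
      · obtain ⟨k', rfl⟩ : ∃ k', k = k' + 1 := by
          refine ⟨k - 1, ?_⟩
          rcases Nat.eq_zero_or_pos k with hk | hk
          · subst hk
            simp only [List.drop_zero] at hsp
            exact absurd (List.isPrefixOf_iff_prefix.2 hsp) hp
          · omega
        have hfr : PySem.Chars.find rest ss = (k' : Int) := by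
          apply find_eq_of rest ss k'
          · simpa [List.drop_succ_cons] using hsp
          · intro i hi
            have := hmin (i + 1) (by omega)
            simpa [List.drop_succ_cons] using this
        rw [mySplit, dif_neg (by simp [hp])]
        rw [ih k' hfr]
        have hdrop : (c :: rest).drop (k' + 1 + ss.length) = rest.drop (k' + ss.length) := by
          rw [show k' + 1 + ss.length = (k' + ss.length) + 1 by omega, List.drop_succ_cons]
        rw [hdrop]
        simp

theorem take_decomp (cs ss : List Char) (k k₂ : Nat)
    (hk : k ≤ cs.length) (hpre : ss.IsPrefix (cs.drop k)) :
    cs.take (k + ss.length + k₂)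
      = cs.take k ++ ss ++ (cs.drop (k + ss.length)).take k₂ := by
  obtain ⟨t, ht⟩ := hpre
  have hX : cs.drop (k + ss.length) = t := by
    rw [← List.drop_drop, ← ht, List.drop_left]
  have hlt : cs.take k ++ (ss ++ t) = cs := by
    rw [ht, List.take_append_drop]
  rw [hX]
  conv_lhs => rw [← hlt]
  rw [List.take_append, List.take_append]
  rw [List.take_of_length_le (show (cs.take k).length ≤ k + ss.length + k₂ by
        simp [Nat.min_eq_left hk]; omega)]
  rw [List.take_of_length_le (show ss.length ≤ k + ss.length + k₂ - (cs.take k).length by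
        simp [Nat.min_eq_left hk]; omega)]
  rw [show k + ss.length + k₂ - (cs.take k).length - ss.length = k₂ by
        simp [Nat.min_eq_left hk]; omega]
  rw [List.append_assoc]

set_option maxHeartbeats 1000000 in
theorem step_eq (nm s : String) (hs : s ≠ "") :
    shorterNameStepA nm s = shorterNameStepB nm s := by
  have hss : s.toList ≠ [] := by
    intro h
    exact hs (by simpa using congrArg String.ofList h)
  have hsplit : PySem.Str.split? nm s
      = some ((mySplit s.toList nm.toList).map String.ofList) := by
    simp [PySem.Str.split?, PySem.Chars.split?, List.isEmpty_iff, hss,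
      splitOn_eq_mySplit _ _ hss]
  have hfind : PySem.Str.find nm s = PySem.Chars.find nm.toList s.toList := by
    simp [pysem]
  simp only [shorterNameStepA, shorterNameStepB, hsplit]
  by_cases h1 : PySem.Chars.find nm.toList s.toList = -1
  · rw [mySplit_no_occ _ _ hss ((PySem.Chars.find_eq_neg_one_iff _ _).1 h1)]
    rw [hfind, h1]
    norm_num
  · have h0 : 0 ≤ PySem.Chars.find nm.toList s.toList := by
      have := PySem.Chars.neg_one_le_find nm.toList s.toList
      omega
    obtain ⟨k, hk⟩ : ∃ k : Nat, PySem.Chars.find nm.toList s.toList = (k : Int) :=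
      ⟨(PySem.Chars.find nm.toList s.toList).toNat, by omega⟩
    obtain ⟨hsp, -⟩ := PySem.Chars.find_spec h0
    rw [hk] at hsp
    simp only [Int.toNat_natCast] at hsp
    have hkle : k ≤ nm.toList.length := by
      have := PySem.Chars.find_le_length nm.toList s.toList
      omega
    have hkm : k + s.toList.length ≤ nm.toList.length := by
      have := hsp.length_le
      simp only [List.length_drop] at this
      omega
    have harg : (k : Int) + PySem.Str.len s = ((k + s.toList.length : Nat) : Int) := by
      simp [pysem]
    rw [mySplit_of_find _ _ hss k hk, hfind, hk, harg]
    rw [show PySem.Str.findFrom nm s (((k + s.toList.length : Nat) : Int)) none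
          = PySem.Chars.findFrom nm.toList s.toList (((k + s.toList.length : Nat) : Int)) none from by
        simp [pysem]]
    rw [PySem.Chars.findFrom_natCast nm.toList s.toList (k + s.toList.length) hkm]
    have hi : ¬ ((k : Int) < 0) := by omega
    rw [if_neg hi]
    by_cases h2 : PySem.Chars.find (nm.toList.drop (k + s.toList.length)) s.toList = -1
    · rw [mySplit_no_occ _ _ hss ((PySem.Chars.find_eq_neg_one_iff _ _).1 h2), if_pos h2]
      norm_num
    · have h20 : 0 ≤ PySem.Chars.find (nm.toList.drop (k + s.toList.length)) s.toList := by
        have := PySem.Chars.neg_one_le_find (nm.toList.drop (k + s.toList.length)) s.toList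
        omega
      obtain ⟨k₂, hk₂⟩ : ∃ k₂ : Nat,
          PySem.Chars.find (nm.toList.drop (k + s.toList.length)) s.toList = (k₂ : Int) :=
        ⟨(PySem.Chars.find (nm.toList.drop (k + s.toList.length)) s.toList).toNat, by omega⟩
      rw [mySplit_of_find _ _ hss k₂ hk₂, if_neg h2, hk₂]
      have hj : ¬ (((k + s.toList.length : Nat) : Int) + (k₂ : Int) < 0) := by
        push_cast; omega
      rw [if_neg hj]
      obtain ⟨p, ps, hms⟩ : ∃ p ps,
          mySplit s.toList ((nm.toList.drop (k + s.toList.length)).drop (k₂ + s.toList.length))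
            = p :: ps := by
        cases hms' : mySplit s.toList
            ((nm.toList.drop (k + s.toList.length)).drop (k₂ + s.toList.length)) with
        | nil => exact absurd hms' (mySplit_ne_nil _ _)
        | cons p ps => exact ⟨p, ps, rfl⟩
      rw [hms]
      have hlen : 3 ≤ ((nm.toList.take k
            :: (nm.toList.drop (k + s.toList.length)).take k₂ :: p :: ps).map String.ofList).length := by
        simp only [List.length_map, List.length_cons]
        omega
      rw [if_pos hlen]
      rw [PySem.List.slice_to _ (show (0 : Int) ≤ 2 by omega)]
      rw [show List.take (2 : Int).toNat ((nm.toList.take k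
            :: (nm.toList.drop (k + s.toList.length)).take k₂ :: p :: ps).map String.ofList)
          = [String.ofList (nm.toList.take k),
             String.ofList ((nm.toList.drop (k + s.toList.length)).take k₂)] from rfl]
      rw [show ([String.ofList (nm.toList.take k),
             String.ofList ((nm.toList.drop (k + s.toList.length)).take k₂)] ++ [".."])
          = [String.ofList (nm.toList.take k),
             String.ofList ((nm.toList.drop (k + s.toList.length)).take k₂), ".."] from rfl]
      have hjoin : PySem.Str.join s [String.ofList (nm.toList.take k),
             String.ofList ((nm.toList.drop (k + s.toList.length)).take k₂), ".."]
          = String.ofList (nm.toList.take k ++ s.toList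
              ++ ((nm.toList.drop (k + s.toList.length)).take k₂ ++ s.toList ++ ['.', '.'])) := by
        have hTL : ∀ l : List Char, (String.ofList l).toList = l := fun l => by simp
        simp only [PySem.Str.join, List.map_cons, List.map_nil, hTL]
        rw [PySem.Chars.join_cons_cons, PySem.Chars.join_cons_cons, PySem.Chars.join_singleton]
      rw [hjoin]
      have hslice : (PySem.Str.slice nm none
            (some (((k + s.toList.length : Nat) : Int) + (k₂ : Int)))).toList
          = nm.toList.take (k + s.toList.length + k₂) := by
        simp only [pysem]
        rw [PySem.List.slice_to _ (show (0 : Int) ≤ ((k + s.toList.length : Nat) : Int) + (k₂ : Int) by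
              push_cast; omega)]
        rw [show ((k + s.toList.length : Nat) : Int) + (k₂ : Int)
              = ((k + s.toList.length + k₂ : Nat) : Int) from by push_cast; ring]
        rw [Int.toNat_natCast]
      rw [hslice]
      rw [take_decomp nm.toList s.toList k k₂ hkle hsp]
      simp [List.append_assoc]

theorem foldl_step_eq (sep : List String) (nm : String) (h : ∀ s ∈ sep, s ≠ "") :
    sep.foldl shorterNameStepA nm = sep.foldl shorterNameStepB nm := by
  induction sep generalizing nm with
  | nil => rfl
  | cons s rest ih =>
      simp only [List.foldl_cons]
      rw [step_eq nm s (h s (by simp))]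
      exact ih _ (fun t ht => h t (by simp [ht]))

-- ===== VERDICT (by name: the statement is the Claim_ definition above) =====
theorem shorter_name_spec : Claim_equal_shorter_name := by
  intro name sep _ hpre
  unfold Spec_shorter_name shorter_name shorter_name_alt
  exact foldl_step_eq sep name hpre
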